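-- pv_equiv track=rewrite | github.com/GabrielePasolli/Advent-of-code-2025 | fifth_puzzle.py | calculate_maximum_joltage
-- ===== SOURCE A (Python) =====
-- def calculate_maximum_joltage(battery_banks):
--     """
--     Calculates the maximum "joltage" for a set of battery banks.
--     Each line represents a battery bank: it selects the highest-value battery,
--     then among the batteries to its right, selects the second highest value.
--     These two values are concatenated to form a number that is added to the total.
--     """
--
--     maximum_joltage = 0  # Total result
--     battery_banks = battery_banks.strip().split('\n')  # Split the input into lines
--
--     for bank in battery_banks:
--         # Variables to store the two maximum values
--         max_battery_1 = 0
--         max_battery_2 = 0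
--         battery_position = 0  # Position of the first maximum
--
--         # Find the maximum value in the row
--         for i in range(0, len(bank) - 1):
--             battery = int(bank[i])
--             if battery > max_battery_1:
--                 max_battery_1 = battery
--                 battery_position = i  # Save the position
--
--         # Find the second maximum to the right of the first
--         for i in range(battery_position + 1, len(bank)):
--             battery = int(bank[i])
--             if battery > max_battery_2:
--                 max_battery_2 = battery
--
--         # Concatenate the two maximum values
--         bank_max_joltage = f"{max_battery_1}{max_battery_2}"
--         maximum_joltage += int(bank_max_joltage)  # Add to the total
--
--     return maximum_joltage
-- ===== SOURCE B (Python) =====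
-- def calculate_maximum_joltage(battery_banks):
--     """One left-to-right pass per bank: track the max digit seen among non-final
--     positions (m1) and the max digit seen strictly after m1's last update (m2)."""
--     total = 0
--     for bank in battery_banks.strip().split('\n'):
--         last = len(bank) - 1
--         m1 = 0
--         m2 = 0
--         for i, c in enumerate(bank):
--             d = int(c)
--             if i < last and d > m1:
--                 m1, m2 = d, 0
--             elif i > 0 and d > m2:
--                 m2 = d
--         total += m1 * 10 + m2
--     return total
-- ===== Notes on version B (the rewrite author's own statement) =====
-- stated objective: alternative
-- what changed: Replaces A's two per-line passes (find max and its position, then rescan to the right of that position) with a single left-to-right pass that keeps the running max over non-final positions and resets a second running max whenever the first one updates.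
-- outside the precondition, e.g. on calculate_maximum_joltage('x'): A returns 0, B raises ValueError
import Mathlib
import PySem

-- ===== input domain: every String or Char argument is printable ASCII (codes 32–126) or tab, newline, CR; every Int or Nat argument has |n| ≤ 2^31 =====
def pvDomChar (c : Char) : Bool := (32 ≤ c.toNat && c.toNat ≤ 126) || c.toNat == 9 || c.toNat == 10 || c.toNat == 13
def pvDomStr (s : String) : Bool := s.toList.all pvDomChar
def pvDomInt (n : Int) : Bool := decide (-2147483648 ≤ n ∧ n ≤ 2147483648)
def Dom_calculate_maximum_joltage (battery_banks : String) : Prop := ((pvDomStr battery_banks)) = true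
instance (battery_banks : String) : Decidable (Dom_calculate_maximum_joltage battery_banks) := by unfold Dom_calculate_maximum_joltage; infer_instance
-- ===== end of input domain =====

-- B replaces A's two per-line passes (max+position, then rescan right of the position) by
-- one left-to-right pass with a reset; same result, same cost (objective: alternative).

-- ===== PORT A =====

-- int(s) for the one-character strings this program feeds it: the digit's value.
-- Exact wherever Python's int() returns (digit chars); non-digit chars raise ValueError
-- and are excluded by Pre_.
def pvDig (c : Char) : Int :=
  if 48 ≤ c.toNat ∧ c.toNat ≤ 57 then ((c.toNat : Int) - 48) else 0

-- body of A's first loop: `battery = int(bank[i]); if battery > max1: max1, pos = battery, i`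
def pvStep1 (bank : List Char) (st : Int × Int) (i : Int) : Int × Int :=
  if pvDig (PySem.List.pyGetD bank i ' ') > st.1 then (pvDig (PySem.List.pyGetD bank i ' '), i) else st

-- body of A's second loop: `battery = int(bank[i]); if battery > max2: max2 = battery`
def pvStep2 (bank : List Char) (m2 : Int) (i : Int) : Int :=
  if pvDig (PySem.List.pyGetD bank i ' ') > m2 then pvDig (PySem.List.pyGetD bank i ' ') else m2

-- int(f"{m1}{m2}")
def pvConcat (m1 m2 : Int) : Int :=
  (PySem.Int.ofChars? (PySem.Int.toChars m1 ++ PySem.Int.toChars m2)).getD 0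

def pvBankA (bank : List Char) : Int :=
  let n : Int := PySem.Chars.len bank
  let st := (PySem.List.pyRange 0 (n - 1) 1).foldl (pvStep1 bank) (0, 0)
  let m2 := (PySem.List.pyRange (st.2 + 1) n 1).foldl (pvStep2 bank) 0
  pvConcat st.1 m2

def calculate_maximum_joltage (battery_banks : String) : Int :=
  (PySem.Chars.splitOn (PySem.Chars.strip battery_banks.toList) ['\n']).foldl
    (fun total bank => total + pvBankA bank) 0

-- ===== PORT B =====

-- body of B's single loop over enumerate(bank)
def pvStepB (last : Int) (st : Int × Int) (p : Int × Char) : Int × Int :=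
  if p.1 < last ∧ pvDig p.2 > st.1 then (pvDig p.2, 0)
  else if 0 < p.1 ∧ pvDig p.2 > st.2 then (st.1, pvDig p.2)
  else st

def pvBankB (bank : List Char) : Int :=
  let last : Int := PySem.Chars.len bank - 1
  let st := (PySem.List.enumerate bank).foldl (pvStepB last) (0, 0)
  st.1 * 10 + st.2

def calculate_maximum_joltage_alt (battery_banks : String) : Int :=
  (PySem.Chars.splitOn (PySem.Chars.strip battery_banks.toList) ['\n']).foldl
    (fun total bank => total + pvBankB bank) 0

-- ===== PRECONDITION & SPEC =====
-- Pre_ excludes inputs where some line contains a non-digit character: Python's int()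
-- raises ValueError there, except that A accidentally returns 0 on lines of length ≤ 1
-- (it never calls int() on them) while B, which reads every character, still raises.
def Pre_calculate_maximum_joltage (battery_banks : String) : Prop :=
  ((PySem.Chars.splitOn (PySem.Chars.strip battery_banks.toList) ['\n']).all
    fun bank => bank.all fun c => decide (48 ≤ c.toNat ∧ c.toNat ≤ 57)) = true

instance (battery_banks : String) : Decidable (Pre_calculate_maximum_joltage battery_banks) := by
  unfold Pre_calculate_maximum_joltage; infer_instance

def pvWitness_calculate_maximum_joltage : String := "123\n456"

def Spec_calculate_maximum_joltage (battery_banks : String) (out : Int) : Prop := out = calculate_maximum_joltage_alt battery_banks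
instance (battery_banks : String) (out : Int) : Decidable (Spec_calculate_maximum_joltage battery_banks out) := by unfold Spec_calculate_maximum_joltage; infer_instance

-- ===== CLAIM (what is proved, stated in full; the proofs are below) =====
def Claim_equal_calculate_maximum_joltage : Prop := ∀ (battery_banks : String), Dom_calculate_maximum_joltage battery_banks → Pre_calculate_maximum_joltage battery_banks → Spec_calculate_maximum_joltage battery_banks (calculate_maximum_joltage battery_banks)

-- ===== LEMMAS AND PROOFS =====

theorem pvDig_bounds (c : Char) : 0 ≤ pvDig c ∧ pvDig c ≤ 9 := by
  unfold pvDig; split_ifs with h <;> omega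

theorem pvConcat_eq (m1 m2 : Int) (h1 : 0 ≤ m1) (h2 : m1 ≤ 9) (h3 : 0 ≤ m2) (h4 : m2 ≤ 9) :
    pvConcat m1 m2 = m1 * 10 + m2 := by
  interval_cases m1 <;> interval_cases m2 <;> decide

-- the first maximum stays in [0,9]
theorem step1_m1_bounds (bank : List Char) (l : List Int) (st : Int × Int)
    (h : 0 ≤ st.1 ∧ st.1 ≤ 9) :
    0 ≤ (l.foldl (pvStep1 bank) st).1 ∧ (l.foldl (pvStep1 bank) st).1 ≤ 9 := by
  induction l generalizing st with
  | nil => exact h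
  | cons i t ih =>
    simp only [List.foldl_cons]
    apply ih
    unfold pvStep1
    split_ifs with hgt
    · exact pvDig_bounds _
    · exact h

-- the second maximum stays in [0,9]
theorem step2_bounds (bank : List Char) (l : List Int) (m : Int)
    (h : 0 ≤ m ∧ m ≤ 9) :
    0 ≤ l.foldl (pvStep2 bank) m ∧ l.foldl (pvStep2 bank) m ≤ 9 := by
  induction l generalizing m with
  | nil => exact h
  | cons i t ih =>
    simp only [List.foldl_cons]
    apply ih
    unfold pvStep2
    split_ifs with hgt
    · exact pvDig_bounds _
    · exact h

-- the stored position is the initial one or one of the scanned indices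
theorem step1_pos_mem (bank : List Char) (l : List Int) (st : Int × Int) :
    (l.foldl (pvStep1 bank) st).2 = st.2 ∨ (l.foldl (pvStep1 bank) st).2 ∈ l := by
  induction l generalizing st with
  | nil => exact Or.inl rfl
  | cons i t ih =>
    simp only [List.foldl_cons]
    by_cases hc : pvDig (PySem.List.pyGetD bank i ' ') > st.1
    · rcases ih (pvStep1 bank st i) with h | h
      · right; rw [h]; simp [pvStep1, if_pos hc]
      · right; simp [h]
    · rcases ih (pvStep1 bank st i) with h | h
      · left; rw [h]; simp [pvStep1, if_neg hc]
      · right; simp [h]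

-- position after scanning range(0, m) is ≥ 0 and (= 0 or < m)
theorem pos_range (bank : List Char) (m : Int) :
    0 ≤ ((PySem.List.pyRange 0 m 1).foldl (pvStep1 bank) (0, 0)).2 ∧
    (((PySem.List.pyRange 0 m 1).foldl (pvStep1 bank) (0, 0)).2 = 0 ∨
     ((PySem.List.pyRange 0 m 1).foldl (pvStep1 bank) (0, 0)).2 < m) := by
  rcases step1_pos_mem bank (PySem.List.pyRange 0 m 1) (0, 0) with h | h
  · simp [h]
  · rw [PySem.List.mem_pyRange_one] at h
    exact ⟨h.1, Or.inr h.2⟩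

-- A's first-loop state after scanning range(0, m), and A's second-loop max over range(p, q)
def pvStA (cs : List Char) (m : Int) : Int × Int :=
  (PySem.List.pyRange 0 m 1).foldl (pvStep1 cs) (0, 0)

def pvM2 (cs : List Char) (p q : Int) : Int :=
  (PySem.List.pyRange p q 1).foldl (pvStep2 cs) 0

-- one step of the second-loop max, phrased as B's elif
theorem pvM2_step (cs : List Char) (p : Int) (k : Nat) (h0 : 0 ≤ p)
    (hp : p = 0 ∨ p < (k : Int)) :
    pvM2 cs (p + 1) ((k : Int) + 1)
      = (if 0 < (k : Int) ∧ pvDig (PySem.List.pyGetD cs (k : Int) ' ') > pvM2 cs (p + 1) (k : Int)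
         then pvDig (PySem.List.pyGetD cs (k : Int) ' ') else pvM2 cs (p + 1) (k : Int)) := by
  by_cases hk : 0 < (k : Int)
  · have hpk : p + 1 ≤ (k : Int) := by omega
    unfold pvM2
    rw [PySem.List.pyRange_one_succ_right (by omega : p + 1 ≤ (k : Int)), List.foldl_append]
    simp only [List.foldl_cons, List.foldl_nil, pvStep2]
    split_ifs with h1 h2 h2 <;> first | rfl | omega
  · have hk0 : (k : Int) = 0 := by omega
    have hp0 : p = 0 := by omega
    subst hp0
    rw [hk0]
    unfold pvM2
    rw [PySem.List.pyRange_one_eq_nil (by omega), PySem.List.pyRange_one_eq_nil (by omega)]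
    simp

-- MAIN INVARIANT: after B has processed the first k characters, its state is
-- (A's first-loop state over range(0, min k (n-1)) , A's second-loop max over range(pos+1, k)).
theorem pvInv (cs : List Char) (k : Nat) (hk : k ≤ cs.length) :
    (PySem.List.enumerate (cs.take k)).foldl (pvStepB ((cs.length : Int) - 1)) (0, 0)
    = ((pvStA cs (min (k : Int) ((cs.length : Int) - 1))).1,
       pvM2 cs ((pvStA cs (min (k : Int) ((cs.length : Int) - 1))).2 + 1) (k : Int)) := by
  induction k with
  | zero =>
    simp only [Nat.cast_zero, List.take_zero, PySem.List.enumerate_nil, List.foldl_nil]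
    unfold pvStA pvM2
    rw [PySem.List.pyRange_one_eq_nil (min_le_left _ _)]
    simp only [List.foldl_nil]
    rw [PySem.List.pyRange_one_eq_nil (by omega)]
    simp
  | succ k ih =>
    have hkl : k < cs.length := hk
    have hkle : k ≤ cs.length := le_of_lt hkl
    -- unfold the left side by one step
    rw [List.take_add_one, List.getElem?_eq_getElem hkl]
    simp only [Option.toList_some]
    rw [PySem.List.enumerate_append, List.foldl_append]
    have hlen : (cs.take k).length = k := by simp [List.length_take, Nat.min_eq_left hkle]
    rw [hlen, ih hkle]
    simp only [PySem.List.enumerate_cons, PySem.List.enumerate_nil, List.foldl_cons, List.foldl_nil,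
      zero_add]
    have hget : PySem.List.pyGetD cs (k : Int) ' ' = cs[k] := by
      rw [PySem.List.pyGetD_natCast]
      simp [List.getD, List.getElem?_eq_getElem hkl]
    push_cast
    set n : Int := (cs.length : Int) with hn
    have hkn : (k : Int) < n := by rw [hn]; exact_mod_cast hkl
    have hpos := pos_range cs (min (k : Int) (n - 1))
    set st := pvStA cs (min (k : Int) (n - 1)) with hst
    have hpos1 : 0 ≤ st.2 := hpos.1
    have hposm : st.2 = 0 ∨ st.2 < min (k : Int) (n - 1) := hpos.2
    have hpos2 : st.2 = 0 ∨ st.2 < (k : Int) := by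
      rcases hposm with h | h
      · exact Or.inl h
      · right; omega
    have hm2 := pvM2_step cs st.2 k hpos1 hpos2
    rw [hget] at hm2
    by_cases hlast : (k : Int) < n - 1
    · -- the scanned index still feeds A's first loop
      have hmin1 : min ((k : Int)) (n - 1) = (k : Int) := min_eq_left (by omega)
      have hst' : pvStA cs (min ((k : Int) + 1) (n - 1)) = pvStep1 cs st (k : Int) := by
        rw [min_eq_left (by omega : (k : Int) + 1 ≤ n - 1), hst, hmin1]
        unfold pvStA
        rw [PySem.List.pyRange_one_succ_right (by omega), List.foldl_append]
        simp
      rw [hst']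
      by_cases hgt : pvDig cs[k] > st.1
      · -- m1 updates: B resets m2; A's next second-loop range (k+1, k+1) is empty
        simp only [pvStepB, pvStep1]
        rw [hget, if_pos hgt, if_pos ⟨hlast, hgt⟩]
        unfold pvM2
        rw [PySem.List.pyRange_one_eq_nil (by omega)]
        simp
      · -- m1 unchanged; B's elif is exactly one step of A's second-loop max
        simp only [pvStepB, pvStep1]
        rw [hget, if_neg hgt, if_neg (fun h => hgt h.2), hm2]
        split_ifs <;> rfl
    · -- k is the last index: A's first loop ignores it
      have hmineq : min ((k : Int) + 1) (n - 1) = min (k : Int) (n - 1) := by omega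
      rw [hmineq, ← hst]
      simp only [pvStepB]
      rw [if_neg (fun h => hlast h.1), hm2]
      split_ifs <;> rfl

theorem bank_eq (cs : List Char) : pvBankA cs = pvBankB cs := by
  have h := pvInv cs cs.length le_rfl
  rw [List.take_length] at h
  have hmin : min ((cs.length : Int)) ((cs.length : Int) - 1) = (cs.length : Int) - 1 :=
    min_eq_right (by omega)
  rw [hmin] at h
  unfold pvStA pvM2 at h
  simp only [pvBankA, pvBankB, PySem.Chars.len_eq]
  rw [h]
  have h1 := step1_m1_bounds cs (PySem.List.pyRange 0 ((cs.length : Int) - 1) 1) (0, 0)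
    (by norm_num)
  have h2 := step2_bounds cs
    (PySem.List.pyRange
      (((PySem.List.pyRange 0 ((cs.length : Int) - 1) 1).foldl (pvStep1 cs) (0, 0)).2 + 1)
      ((cs.length : Int)) 1) 0 (by norm_num)
  exact pvConcat_eq _ _ h1.1 h1.2 h2.1 h2.2

-- ===== VERDICT (by name: the statement is the Claim_ definition above) =====
theorem calculate_maximum_joltage_spec : Claim_equal_calculate_maximum_joltage := by
  intro s _ _
  unfold Spec_calculate_maximum_joltage
  unfold calculate_maximum_joltage calculate_maximum_joltage_alt
  apply PySem.List.foldl_congr_mem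
  intro acc x hx
  rw [bank_eq]
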